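-- pv_equiv track=rewrite | github.com/lemoz/darwin-godel-machine | agent/reverse_with_numbers.py | reverse_with_numbers
-- ===== SOURCE A (Python) =====
-- def reverse_with_numbers(s):
--     """
--     Reverse alphabetic characters while keeping numeric characters in their original positions.
--
--     Args:
--         s (str): Input string
--
--     Returns:
--         str: String with alphabetic characters reversed, numeric characters unchanged
--     """
--     if not s:
--         return s
--
--     # Convert string to list for easier manipulation
--     chars = list(s)
--
--     # Extract only alphabetic characters
--     alpha_chars = [c for c in s if c.isalpha()]
--
--     # Reverse the alphabetic characters
--     alpha_chars.reverse()
--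
--     # Replace alphabetic characters in original positions with reversed ones
--     alpha_index = 0
--     for i in range(len(chars)):
--         if chars[i].isalpha():
--             chars[i] = alpha_chars[alpha_index]
--             alpha_index += 1
--
--     return ''.join(chars)
-- ===== SOURCE B (Python) =====
-- def reverse_with_numbers(s):
--     chars = list(s)
--     i, j = 0, len(chars) - 1
--     while i < j:
--         if not chars[i].isalpha():
--             i += 1
--         elif not chars[j].isalpha():
--             j -= 1
--         else:
--             chars[i], chars[j] = chars[j], chars[i]
--             i += 1
--             j -= 1
--     return ''.join(chars)
-- ===== Notes on version B (the rewrite author's own statement) =====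
-- stated objective: alternative
-- what changed: Replaces A's extract-filter-reverse-then-reinsert (two passes plus an auxiliary reversed buffer) with an in-place two-pointer swap loop that converges from both ends, swapping only when both pointers rest on alphabetic characters.
import Mathlib
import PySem

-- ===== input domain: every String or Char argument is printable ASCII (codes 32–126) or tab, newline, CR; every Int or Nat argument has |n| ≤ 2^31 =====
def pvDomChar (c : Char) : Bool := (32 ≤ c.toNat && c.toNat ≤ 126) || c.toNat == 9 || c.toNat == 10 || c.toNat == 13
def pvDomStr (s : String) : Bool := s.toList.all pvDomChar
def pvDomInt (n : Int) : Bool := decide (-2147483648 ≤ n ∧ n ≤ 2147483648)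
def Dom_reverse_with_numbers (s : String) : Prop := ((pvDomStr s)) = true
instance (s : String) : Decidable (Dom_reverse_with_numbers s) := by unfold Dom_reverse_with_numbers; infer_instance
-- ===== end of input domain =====

-- B replaces A's extract/reverse/reinsert passes with an in-place two-pointer swap loop
-- converging from both ends (objective: alternative algorithm, same cost).

-- ===== PORT A =====
-- the body of A's `for i in range(len(chars))` loop; state = (chars, alpha_index)
def stepA (alphaChars : List Char) (st : List Char × Int) (i : Int) : List Char × Int :=
  if PySem.Chars.isalpha (PySem.List.pyGetD st.1 i ' ') then
    (PySem.List.pySetD st.1 i (PySem.List.pyGetD alphaChars st.2 ' '), st.2 + 1)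
  else st

def reverse_with_numbers (s : String) : String :=
  if s = "" then s
  else
    let chars := s.toList
    -- alpha_chars = [c for c in s if c.isalpha()]; alpha_chars.reverse()
    let alphaChars := (s.toList.filter (fun c => PySem.Chars.isalpha c)).reverse
    -- all indices used by the loop are in range, so the total pyGetD/pySetD forms are exact here
    let res := (PySem.List.pyRange 0 chars.length 1).foldl (stepA alphaChars) (chars, 0)
    String.mk res.1

-- ===== PORT B =====
-- the `while i < j` loop of Source B; i and j stay nonnegative in every reachable state,
-- so the total pyGetD/pySetD forms are exact here
def revLoop (chars : List Char) (i j : Int) : List Char :=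
  if h : i < j then
    if ¬ PySem.Chars.isalpha (PySem.List.pyGetD chars i ' ') then revLoop chars (i + 1) j
    else if ¬ PySem.Chars.isalpha (PySem.List.pyGetD chars j ' ') then revLoop chars i (j - 1)
    else
      let ci := PySem.List.pyGetD chars i ' '
      let cj := PySem.List.pyGetD chars j ' '
      revLoop (PySem.List.pySetD (PySem.List.pySetD chars i cj) j ci) (i + 1) (j - 1)
  else chars
termination_by (j - i).toNat
decreasing_by all_goals omega

def reverse_with_numbers_alt (s : String) : String :=
  String.mk (revLoop s.toList 0 ((s.toList.length : Int) - 1))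

-- ===== PRECONDITION & SPEC =====
def Spec_reverse_with_numbers (s : String) (out : String) : Prop := out = reverse_with_numbers_alt s
instance (s : String) (out : String) : Decidable (Spec_reverse_with_numbers s out) := by unfold Spec_reverse_with_numbers; infer_instance

-- ===== CLAIM (what is proved, stated in full; the proofs are below) =====
def Claim_equal_reverse_with_numbers : Prop := ∀ (s : String), Dom_reverse_with_numbers s → Spec_reverse_with_numbers s (reverse_with_numbers s)

-- ===== LEMMAS AND PROOFS =====

-- canonical description both ports are proved equal to: replace the alpha positions of m,
-- left to right, by successive elements of ys
def amerge : List Char → List Char → List Char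
  | [], _ => []
  | c :: cs, ys =>
      if PySem.Chars.isalpha c then ys.headD ' ' :: amerge cs ys.tail else c :: amerge cs ys

def gfun (m : List Char) : List Char :=
  amerge m ((m.filter (fun c => PySem.Chars.isalpha c)).reverse)

theorem amerge_append (u v ys : List Char) :
    amerge (u ++ v) ys = amerge u ys ++ amerge v (ys.drop (u.countP (fun c => PySem.Chars.isalpha c))) := by
  induction u generalizing ys with
  | nil => simp [amerge]
  | cons c u ih =>
    by_cases hc : PySem.Chars.isalpha c
    · simp [amerge, hc, ih]
    · simp [amerge, hc, ih]

theorem amerge_append_right (u ys zs : List Char)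
    (h : u.countP (fun c => PySem.Chars.isalpha c) ≤ ys.length) :
    amerge u (ys ++ zs) = amerge u ys := by
  induction u generalizing ys with
  | nil => simp [amerge]
  | cons c u ih =>
    by_cases hc : PySem.Chars.isalpha c
    · have hne : ys ≠ [] := by
        intro h0; subst h0; simp [hc] at h
      obtain ⟨y, ys', rfl⟩ := List.exists_cons_of_ne_nil hne
      simp [amerge, hc]
      apply ih
      simp [hc] at h
      simpa using h
    · simp [amerge, hc]
      apply ih
      simpa [List.countP_cons, hc] using h

theorem gfun_nil : gfun [] = [] := rfl

theorem gfun_single (c : Char) : gfun [c] = [c] := by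
  by_cases hc : PySem.Chars.isalpha c <;> simp [gfun, amerge, hc]

theorem gfun_cons_nonalpha (c : Char) (m : List Char) (hc : ¬ PySem.Chars.isalpha c) :
    gfun (c :: m) = c :: gfun m := by
  simp [gfun, amerge, hc]

theorem gfun_snoc_nonalpha (m : List Char) (e : Char) (he : ¬ PySem.Chars.isalpha e) :
    gfun (m ++ [e]) = gfun m ++ [e] := by
  unfold gfun
  rw [List.filter_append]
  simp only [List.filter_cons, List.filter_nil, he]
  simp only [Bool.false_eq_true, if_false, List.append_nil]
  rw [amerge_append]
  simp [amerge, he]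

theorem gfun_both_alpha (c e : Char) (m : List Char)
    (hc : PySem.Chars.isalpha c) (he : PySem.Chars.isalpha e) :
    gfun (c :: (m ++ [e])) = e :: gfun m ++ [c] := by
  rw [← List.cons_append]
  unfold gfun
  have hflen : (m.filter (fun c => PySem.Chars.isalpha c)).length
      = m.countP (fun c => PySem.Chars.isalpha c) := by rw [List.countP_eq_length_filter]
  rw [List.cons_append, List.filter_cons_of_pos (by simpa using hc), List.filter_append]
  simp only [List.filter_cons, List.filter_nil, he, if_true]
  rw [List.reverse_cons, List.reverse_append]
  simp only [List.reverse_cons, List.reverse_nil, List.nil_append, List.singleton_append]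
  rw [amerge]
  simp only [hc, if_true, List.headD]
  rw [List.cons_append, amerge_append]
  congr 1
  congr 1
  · exact amerge_append_right m _ [c] (by simp [hflen])
  · have hd : ((m.filter (fun c => PySem.Chars.isalpha c)).reverse ++ [c]).drop
        (m.countP (fun c => PySem.Chars.isalpha c)) = [c] := by
      rw [List.drop_append_of_le_length (by simp [hflen])]
      simp [hflen]
    simp [amerge, he, hd]

-- list-surgery facts specialised to an xs ++ m ++ ys split
theorem getD_middle (xs m ys : List Char) (t : Nat) (h : t < m.length) (d : Char) :
    (xs ++ m ++ ys).getD (xs.length + t) d = m.getD t d := by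
  rw [List.append_assoc]
  simp [List.getD_eq_getElem?_getD, List.getElem?_append_right, List.getElem?_append_left h]

theorem set_middle (xs m ys : List Char) (t : Nat) (h : t < m.length) (v : Char) :
    (xs ++ m ++ ys).set (xs.length + t) v = xs ++ m.set t v ++ ys := by
  rw [List.append_assoc, List.set_append_right _ _ (by omega), Nat.add_sub_cancel_left,
      List.set_append_left _ _ h, List.append_assoc]

-- ===== A-side: the reinsertion loop computes amerge =====
theorem stepA_loop (R : List Char) :
    ∀ (rest done : List Char) (k : Nat),
      ((PySem.List.pyRange (done.length : Int) ((done.length : Int) + (rest.length : Int)) 1).foldl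
          (stepA R) (done ++ rest, (k : Int))).1
        = done ++ amerge rest (R.drop k) := by
  intro rest
  induction rest with
  | nil =>
    intro done k
    simp only [List.length_nil, Nat.cast_zero, add_zero, List.append_nil]
    rw [show PySem.List.pyRange (done.length : Int) (done.length : Int) 1 = [] by
      simp [PySem.List.pyRange]]
    simp [amerge]
  | cons c rest ih =>
    intro done k
    rw [PySem.List.pyRange_one_cons (by push_cast [List.length_cons]; omega)]
    simp only [List.foldl_cons]
    have hget : PySem.List.pyGetD (done ++ c :: rest) (done.length : Int) ' ' = c := by
      rw [PySem.List.pyGetD_natCast]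
      simpa using getD_middle done (c :: rest) [] 0 (by simp) ' '
    by_cases hc : PySem.Chars.isalpha c
    · have hset : PySem.List.pySetD (done ++ c :: rest) (done.length : Int)
          (PySem.List.pyGetD R (k : Int) ' ') = done ++ (R.getD k ' ') :: rest := by
        rw [PySem.List.pySetD_natCast, PySem.List.pyGetD_natCast]
        simpa using set_middle done (c :: rest) [] 0 (by simp) (R.getD k ' ')
      rw [show stepA R (done ++ c :: rest, (k : Int)) (done.length : Int)
            = (done ++ (R.getD k ' ') :: rest, ((k + 1 : Nat) : Int)) by
        simp only [stepA, hget, hc, if_true, hset]; push_cast; ring_nf]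
      have := ih (done ++ [R.getD k ' ']) (k + 1)
      rw [show (done ++ (R.getD k ' ') :: rest) = (done ++ [R.getD k ' ']) ++ rest by simp] at *
      rw [show ((done.length : Int) + 1) = (((done ++ [R.getD k ' ']).length : Nat) : Int) by
            simp, show ((done.length : Int) + ((c :: rest).length : Int))
            = (((done ++ [R.getD k ' ']).length : Nat) : Int) + (rest.length : Int) by
            push_cast; simp; ring]
      rw [this]
      simp only [amerge, hc, if_true, List.append_assoc, List.singleton_append]
      congr 2
      · symm
        simp [List.getD_eq_getElem?_getD, List.head?_drop]
      · rw [List.tail_drop]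
    · rw [show stepA R (done ++ c :: rest, (k : Int)) (done.length : Int)
            = (done ++ c :: rest, (k : Int)) by simp [stepA, hget, hc]]
      have := ih (done ++ [c]) k
      rw [show (done ++ c :: rest) = (done ++ [c]) ++ rest by simp] at *
      rw [show ((done.length : Int) + 1) = (((done ++ [c]).length : Nat) : Int) by simp,
          show ((done.length : Int) + ((c :: rest).length : Int))
            = (((done ++ [c]).length : Nat) : Int) + (rest.length : Int) by push_cast; simp; ring]
      rw [this]
      simp [amerge, hc]

theorem portA_eq_gfun (s : String) : reverse_with_numbers s = String.mk (gfun s.toList) := by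
  by_cases hs : s = ""
  · subst hs; rfl
  · unfold reverse_with_numbers
    rw [if_neg hs]
    have h := stepA_loop ((s.toList.filter (fun c => PySem.Chars.isalpha c)).reverse)
        s.toList [] 0
    simp only [List.length_nil, Nat.cast_zero, zero_add, List.nil_append, List.drop_zero] at h
    simp only [gfun]
    rw [← h]

-- ===== B-side: the two-pointer loop computes gfun =====
theorem revLoop_eq_gfun :
    ∀ (n : Nat) (xs m ys : List Char), m.length ≤ n →
      revLoop (xs ++ m ++ ys) (xs.length : Int) ((xs.length : Int) + (m.length : Int) - 1)
        = xs ++ gfun m ++ ys := by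
  intro n
  induction n with
  | zero =>
    intro xs m ys hm
    have : m = [] := List.eq_nil_of_length_eq_zero (by omega)
    subst this
    rw [revLoop]
    simp [gfun, amerge]
  | succ n ih =>
    intro xs m ys hm
    by_cases hlen : m.length ≤ 1
    · rw [revLoop, dif_neg (by push_cast; omega)]
      match m, hlen with
      | [], _ => simp [gfun_nil]
      | [c], _ => simp [gfun_single]
    · -- m has length ≥ 2 : split m = c :: mid ++ [e]
      obtain ⟨c, m', rfl⟩ : ∃ c m', m = c :: m' := by
        cases m with
        | nil => simp at hlen
        | cons c m' => exact ⟨c, m', rfl⟩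
      have hm' : m' ≠ [] := by intro h0; subst h0; simp at hlen
      obtain ⟨mid, e, rfl⟩ : ∃ mid e, m' = mid ++ [e] :=
        ⟨m'.dropLast, m'.getLast hm', by rw [List.dropLast_append_getLast hm']⟩
      have hL : (c :: (mid ++ [e])).length = mid.length + 2 := by simp
      have hij : (xs.length : Int) < (xs.length : Int) + ((c :: (mid ++ [e])).length : Int) - 1 := by
        rw [hL]; push_cast; omega
      have hgi : PySem.List.pyGetD (xs ++ (c :: (mid ++ [e])) ++ ys) (xs.length : Int) ' ' = c := by
        rw [PySem.List.pyGetD_natCast]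
        simpa using getD_middle xs (c :: (mid ++ [e])) ys 0 (by simp) ' '
      have hjnat : (xs.length : Int) + ((c :: (mid ++ [e])).length : Int) - 1
          = ((xs.length + (mid.length + 1) : Nat) : Int) := by rw [hL]; push_cast; ring
      have hgj : PySem.List.pyGetD (xs ++ (c :: (mid ++ [e])) ++ ys)
          ((xs.length : Int) + ((c :: (mid ++ [e])).length : Int) - 1) ' ' = e := by
        rw [hjnat, PySem.List.pyGetD_natCast]
        have := getD_middle xs (c :: (mid ++ [e])) ys (mid.length + 1) (by simp) ' '
        rw [this]
        have : (c :: (mid ++ [e])).getD (mid.length + 1) ' '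
            = ((c :: mid) ++ [e]).getD (c :: mid).length ' ' := by simp
        rw [this]
        simpa using getD_middle (c :: mid) [e] [] 0 (by simp) ' '
      rw [revLoop, dif_pos hij]
      simp only [hgi, hgj]
      by_cases hc : PySem.Chars.isalpha c
      · by_cases he : PySem.Chars.isalpha e
        · -- both alpha: swap and recurse inward
          rw [if_neg (by simp [hc]), if_neg (by simp [he])]
          have hswap : PySem.List.pySetD
              (PySem.List.pySetD (xs ++ (c :: (mid ++ [e])) ++ ys) (xs.length : Int) e)
              ((xs.length : Int) + ((c :: (mid ++ [e])).length : Int) - 1) c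
              = (xs ++ [e]) ++ mid ++ ([c] ++ ys) := by
            have h1 : (xs ++ (c :: (mid ++ [e])) ++ ys).set xs.length e
                = xs ++ (e :: (mid ++ [e])) ++ ys := by
              simpa using set_middle xs (c :: (mid ++ [e])) ys 0 (by simp) e
            rw [PySem.List.pySetD_natCast, h1, hjnat, PySem.List.pySetD_natCast]
            rw [set_middle xs (e :: (mid ++ [e])) ys (mid.length + 1) (by simp) c]
            have : (e :: (mid ++ [e])).set (mid.length + 1) c = e :: (mid ++ [c]) := by
              have : (e :: (mid ++ [e])).set (mid.length + 1) c
                  = ((e :: mid) ++ [e]).set (e :: mid).length c := by simp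
              rw [this, List.set_append_right _ _ (le_refl _)]
              simp
            rw [this]
            simp
          rw [hswap]
          have := ih (xs ++ [e]) mid ([c] ++ ys) (by simp at hm ⊢; omega)
          rw [show ((xs.length : Int) + 1) = (((xs ++ [e]).length : Nat) : Int) by simp] at *
          rw [show (xs.length : Int) + ((c :: (mid ++ [e])).length : Int) - 1 - 1
              = (((xs ++ [e]).length : Nat) : Int) + (mid.length : Int) - 1 by
            rw [hL]; push_cast; simp; ring]
          rw [this, show (c :: (mid ++ [e])) = c :: (mid ++ [e]) from rfl, gfun_both_alpha c e mid hc he]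
          simp
        · -- right end not alpha: peel e off the right
          rw [if_neg (by simp [hc]), if_pos (by simp [he])]
          have := ih xs ((c :: mid)) ([e] ++ ys) (by simp at hm ⊢; omega)
          rw [show (xs ++ (c :: (mid ++ [e])) ++ ys) = xs ++ (c :: mid) ++ ([e] ++ ys) by simp] at *
          rw [show (xs.length : Int) + ((c :: (mid ++ [e])).length : Int) - 1 - 1
              = (xs.length : Int) + (((c :: mid)).length : Int) - 1 by rw [hL]; push_cast; simp; ring]
          rw [this]
          rw [show (c :: (mid ++ [e])) = (c :: mid) ++ [e] by simp,
              gfun_snoc_nonalpha _ _ he]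
          simp
      · -- left end not alpha: peel c off the left
        rw [if_pos (by simp [hc])]
        have := ih (xs ++ [c]) (mid ++ [e]) ys (by simp at hm ⊢; omega)
        rw [show (xs ++ (c :: (mid ++ [e])) ++ ys) = (xs ++ [c]) ++ (mid ++ [e]) ++ ys by simp] at *
        rw [show ((xs.length : Int) + 1) = (((xs ++ [c]).length : Nat) : Int) by simp] at *
        rw [show (xs.length : Int) + ((c :: (mid ++ [e])).length : Int) - 1
            = (((xs ++ [c]).length : Nat) : Int) + (((mid ++ [e]).length : Nat) : Int) - 1 by
          rw [hL]; push_cast; simp; ring]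
        rw [this, gfun_cons_nonalpha c _ hc]
        simp

theorem portB_eq_gfun (s : String) : reverse_with_numbers_alt s = String.mk (gfun s.toList) := by
  unfold reverse_with_numbers_alt
  have := revLoop_eq_gfun s.toList.length [] s.toList [] (le_refl _)
  simp only [List.length_nil, Nat.cast_zero, List.nil_append, List.append_nil, zero_add] at this
  rw [this]

-- ===== VERDICT (by name: the statement is the Claim_ definition above) =====
theorem reverse_with_numbers_spec : Claim_equal_reverse_with_numbers := by
  intro s _
  unfold Spec_reverse_with_numbers
  rw [portA_eq_gfun, portB_eq_gfun]
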